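-- pv_equiv track=rewrite | github.com/eloygeenjaar/normative-smri-psychopathology | lib/lkfolds.py | _generate_column_subsets
-- ===== SOURCE A (Python) =====
-- def _generate_column_subsets(clean_columns):
--     type_dict = {
--         'int_symptoms': 'sum_int_',
--         'ext_symptoms': 'sum_ext_',
--         'dp_symptoms': 'sum_dp',
--         'thickness': '_thickavg',
--         'volume': '_vol',
--         'age': 'age_mri'}
--     model_dict = {'model1': dict.fromkeys(type_dict.keys(), None),
--                   'model2': dict.fromkeys(type_dict.keys(), None),
--                   'model0': dict.fromkeys(type_dict.keys(), None)}
--     for (key, val) in type_dict.items():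
--         model_dict['model1'][key] = [
--             col for col in clean_columns if
--             (val in col or val == col) and 'model1' in col]
--         model_dict['model2'][key] = [
--             col for col in clean_columns
--             if (val in col or val == col) and 'model2' in col]
--         model_dict['model0'][key] = [
--             col for col in clean_columns
--             if (val in col or val == col) and (('model1' not in col) and ('model2' not in col)) and col != 'age_mri']
--     return model_dict
-- ===== SOURCE B (Python) =====
-- def _generate_column_subsets(clean_columns):
--     type_dict = {
--         'int_symptoms': 'sum_int_',
--         'ext_symptoms': 'sum_ext_',
--         'dp_symptoms': 'sum_dp',
--         'thickness': '_thickavg',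
--         'volume': '_vol',
--         'age': 'age_mri'}
--     model_dict = {m: {k: [] for k in type_dict} for m in ('model1', 'model2', 'model0')}
--     for col in clean_columns:
--         models = []
--         if 'model1' in col:
--             models.append('model1')
--         if 'model2' in col:
--             models.append('model2')
--         if 'model1' not in col and 'model2' not in col and col != 'age_mri':
--             models.append('model0')
--         for m in models:
--             target = model_dict[m]
--             for key, val in type_dict.items():
--                 if val in col:
--                     target[key].append(col)
--     return model_dict
-- ===== Notes on version B (the rewrite author's own statement) =====
-- stated objective: alternative
-- what changed: A makes 18 separate filter passes over clean_columns (one per model x type bucket); B makes a single pass over the columns, deciding each column's model membership once and appending it to every matching (model, type) bucket.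
import Mathlib
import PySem

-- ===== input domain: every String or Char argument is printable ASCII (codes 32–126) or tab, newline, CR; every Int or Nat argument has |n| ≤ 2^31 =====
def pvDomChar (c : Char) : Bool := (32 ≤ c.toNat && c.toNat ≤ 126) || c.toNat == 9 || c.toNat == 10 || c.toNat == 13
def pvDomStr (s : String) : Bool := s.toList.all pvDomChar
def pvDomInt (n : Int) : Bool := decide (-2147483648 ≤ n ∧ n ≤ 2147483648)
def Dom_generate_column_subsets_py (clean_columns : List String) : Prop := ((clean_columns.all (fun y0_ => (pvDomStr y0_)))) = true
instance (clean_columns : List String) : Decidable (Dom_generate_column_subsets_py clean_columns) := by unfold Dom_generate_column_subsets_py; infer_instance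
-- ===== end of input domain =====

-- ===== PORT A =====
-- B is a single pass over the columns instead of A's 18 filter passes (one per model x type); same result, different decomposition.
-- Shared literal from both Pythons: type_dict as an association list (insertion order).
def pvTypeDict : List (String × String) :=
  [("int_symptoms", "sum_int_"), ("ext_symptoms", "sum_ext_"), ("dp_symptoms", "sum_dp"),
   ("thickness", "_thickavg"), ("volume", "_vol"), ("age", "age_mri")]

-- Python "sub in col" (substring test)
def pvIn (sub col : String) : Bool := PySem.Str.isIn sub col

-- d[k] = f(d[k]) on an association-list dict with fixed keys (in-place update keeps position)
def pvModAt {alpha : Type} (d : List (String × alpha)) (k : String) (f : alpha → alpha) : List (String × alpha) :=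
  d.map (fun p => if p.1 = k then (p.1, f p.2) else p)

-- Port of A: model_dict with its three inner dicts (dict.fromkeys(..., None): the None placeholder is
-- rendered as [] — every key is overwritten by the loop before the dict is returned, so it is never read);
-- then the loop over type_dict.items() assigning the three filtered lists per key.
def generate_column_subsets_py (clean_columns : List String) : List (String × List (String × List String)) :=
  let init : List (String × List String) := pvTypeDict.map (fun kv => (kv.1, []))
  let md : List (String × List (String × List String)) := [("model1", init), ("model2", init), ("model0", init)]
  pvTypeDict.foldl (fun md kv =>
    let key := kv.1
    let val := kv.2
    let md := pvModAt md "model1" (fun d => pvModAt d key (fun _ =>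
      clean_columns.filter (fun col => (pvIn val col || val == col) && pvIn "model1" col)))
    let md := pvModAt md "model2" (fun d => pvModAt d key (fun _ =>
      clean_columns.filter (fun col => (pvIn val col || val == col) && pvIn "model2" col)))
    let md := pvModAt md "model0" (fun d => pvModAt d key (fun _ =>
      clean_columns.filter (fun col => ((pvIn val col || val == col) && (!pvIn "model1" col && !pvIn "model2" col)) && !(col == "age_mri"))))
    md) md

-- ===== PORT B =====
-- Port of B (Source B): one pass over clean_columns; per column compute its model list, then append the
-- column to every matching (model, type) bucket.
def generate_column_subsets_py_alt (clean_columns : List String) : List (String × List (String × List String)) :=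
  let init : List (String × List String) := pvTypeDict.map (fun kv => (kv.1, []))
  let md0 : List (String × List (String × List String)) := [("model1", init), ("model2", init), ("model0", init)]
  clean_columns.foldl (fun md col =>
    let models : List String :=
      ((if pvIn "model1" col then ["model1"] else []) ++
       (if pvIn "model2" col then ["model2"] else [])) ++
      (if !pvIn "model1" col && !pvIn "model2" col && !(col == "age_mri") then ["model0"] else [])
    models.foldl (fun md m =>
      pvModAt md m (fun target =>
        pvTypeDict.foldl (fun target kv =>
          if pvIn kv.2 col then pvModAt target kv.1 (fun l => l ++ [col]) else target) target)) md) md0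
-- ===== PRECONDITION & SPEC =====
def Spec_generate_column_subsets_py (clean_columns : List String) (out : List (String × List (String × List String))) : Prop := out = generate_column_subsets_py_alt clean_columns
instance (clean_columns : List String) (out : List (String × List (String × List String))) : Decidable (Spec_generate_column_subsets_py clean_columns out) := by unfold Spec_generate_column_subsets_py; infer_instance

-- ===== CLAIM (what is proved, stated in full; the proofs are below) =====
def Claim_equal_generate_column_subsets_py : Prop := ∀ (clean_columns : List String), Dom_generate_column_subsets_py clean_columns → Spec_generate_column_subsets_py clean_columns (generate_column_subsets_py clean_columns)

-- ===== LEMMAS AND PROOFS =====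

-- the fixed shape of the nested dict: three models, six type buckets each
def pvT (l1 l2 l3 l4 l5 l6 : List String) : List (String × List String) :=
  [("int_symptoms", l1), ("ext_symptoms", l2), ("dp_symptoms", l3),
   ("thickness", l4), ("volume", l5), ("age", l6)]

def pvS (m1 m2 m0 : List (String × List String)) : List (String × List (String × List String)) :=
  [("model1", m1), ("model2", m2), ("model0", m0)]

-- the six type substrings, the three model conditions
def pvM0 (col : String) : Bool := !pvIn "model1" col && !pvIn "model2" col && !(col == "age_mri")

lemma pv_ite_cons (c : Prop) [Decidable c] (x : String) (l : List String) :
    (if c then [x] else []) ++ l = if c then x :: l else l := by split_ifs <;> simp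

-- updating one model of the fixed shape
lemma pv_modAt_S1 (f : List (String × List String) → List (String × List String)) (m1 m2 m0 : List (String × List String)) :
    pvModAt (pvS m1 m2 m0) "model1" f = pvS (f m1) m2 m0 := by simp [pvS, pvModAt]
lemma pv_modAt_S2 (f : List (String × List String) → List (String × List String)) (m1 m2 m0 : List (String × List String)) :
    pvModAt (pvS m1 m2 m0) "model2" f = pvS m1 (f m2) m0 := by simp [pvS, pvModAt]
lemma pv_modAt_S0 (f : List (String × List String) → List (String × List String)) (m1 m2 m0 : List (String × List String)) :
    pvModAt (pvS m1 m2 m0) "model0" f = pvS m1 m2 (f m0) := by simp [pvS, pvModAt]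

-- the inner loop over type_dict appends col to every bucket whose substring matches
lemma pv_inner_eq (col : String) (l1 l2 l3 l4 l5 l6 : List String) :
    pvTypeDict.foldl (fun target kv =>
        if pvIn kv.2 col then pvModAt target kv.1 (fun l => l ++ [col]) else target)
      (pvT l1 l2 l3 l4 l5 l6)
    = pvT (l1 ++ (if pvIn "sum_int_" col then [col] else []))
          (l2 ++ (if pvIn "sum_ext_" col then [col] else []))
          (l3 ++ (if pvIn "sum_dp" col then [col] else []))
          (l4 ++ (if pvIn "_thickavg" col then [col] else []))
          (l5 ++ (if pvIn "_vol" col then [col] else []))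
          (l6 ++ (if pvIn "age_mri" col then [col] else [])) := by
  simp only [pvTypeDict, List.foldl]
  split_ifs <;> simp [pvT, pvModAt]

-- one step of B's loop, on a state of the fixed shape
lemma pv_step_eq (col : String) (a1 a2 a3 a4 a5 a6 b1 b2 b3 b4 b5 b6 c1 c2 c3 c4 c5 c6 : List String) :
    (let models : List String :=
      ((if pvIn "model1" col then ["model1"] else []) ++
       (if pvIn "model2" col then ["model2"] else [])) ++
      (if !pvIn "model1" col && !pvIn "model2" col && !(col == "age_mri") then ["model0"] else [])
     models.foldl (fun md m =>
       pvModAt md m (fun target =>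
         pvTypeDict.foldl (fun target kv =>
           if pvIn kv.2 col then pvModAt target kv.1 (fun l => l ++ [col]) else target) target))
       (pvS (pvT a1 a2 a3 a4 a5 a6) (pvT b1 b2 b3 b4 b5 b6) (pvT c1 c2 c3 c4 c5 c6)))
    = pvS
        (pvT (a1 ++ (if pvIn "sum_int_" col && pvIn "model1" col then [col] else []))
             (a2 ++ (if pvIn "sum_ext_" col && pvIn "model1" col then [col] else []))
             (a3 ++ (if pvIn "sum_dp" col && pvIn "model1" col then [col] else []))
             (a4 ++ (if pvIn "_thickavg" col && pvIn "model1" col then [col] else []))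
             (a5 ++ (if pvIn "_vol" col && pvIn "model1" col then [col] else []))
             (a6 ++ (if pvIn "age_mri" col && pvIn "model1" col then [col] else [])))
        (pvT (b1 ++ (if pvIn "sum_int_" col && pvIn "model2" col then [col] else []))
             (b2 ++ (if pvIn "sum_ext_" col && pvIn "model2" col then [col] else []))
             (b3 ++ (if pvIn "sum_dp" col && pvIn "model2" col then [col] else []))
             (b4 ++ (if pvIn "_thickavg" col && pvIn "model2" col then [col] else []))
             (b5 ++ (if pvIn "_vol" col && pvIn "model2" col then [col] else []))
             (b6 ++ (if pvIn "age_mri" col && pvIn "model2" col then [col] else [])))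
        (pvT (c1 ++ (if pvIn "sum_int_" col && pvM0 col then [col] else []))
             (c2 ++ (if pvIn "sum_ext_" col && pvM0 col then [col] else []))
             (c3 ++ (if pvIn "sum_dp" col && pvM0 col then [col] else []))
             (c4 ++ (if pvIn "_thickavg" col && pvM0 col then [col] else []))
             (c5 ++ (if pvIn "_vol" col && pvM0 col then [col] else []))
             (c6 ++ (if pvIn "age_mri" col && pvM0 col then [col] else []))) := by
  by_cases h1 : pvIn "model1" col <;> by_cases h2 : pvIn "model2" col <;>
    by_cases h3 : col == "age_mri" <;>
      simp [h1, h2, h3, pv_modAt_S1, pv_modAt_S2, pv_modAt_S0, pv_inner_eq, pvM0]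

-- B's whole loop from a state of the fixed shape
lemma pv_loop_eq (cols : List String)
    (a1 a2 a3 a4 a5 a6 b1 b2 b3 b4 b5 b6 c1 c2 c3 c4 c5 c6 : List String) :
    cols.foldl (fun md col =>
      let models : List String :=
        ((if pvIn "model1" col then ["model1"] else []) ++
         (if pvIn "model2" col then ["model2"] else [])) ++
        (if !pvIn "model1" col && !pvIn "model2" col && !(col == "age_mri") then ["model0"] else [])
      models.foldl (fun md m =>
        pvModAt md m (fun target =>
          pvTypeDict.foldl (fun target kv =>
            if pvIn kv.2 col then pvModAt target kv.1 (fun l => l ++ [col]) else target) target)) md)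
      (pvS (pvT a1 a2 a3 a4 a5 a6) (pvT b1 b2 b3 b4 b5 b6) (pvT c1 c2 c3 c4 c5 c6))
    = pvS
        (pvT (a1 ++ cols.filter (fun col => pvIn "sum_int_" col && pvIn "model1" col))
             (a2 ++ cols.filter (fun col => pvIn "sum_ext_" col && pvIn "model1" col))
             (a3 ++ cols.filter (fun col => pvIn "sum_dp" col && pvIn "model1" col))
             (a4 ++ cols.filter (fun col => pvIn "_thickavg" col && pvIn "model1" col))
             (a5 ++ cols.filter (fun col => pvIn "_vol" col && pvIn "model1" col))
             (a6 ++ cols.filter (fun col => pvIn "age_mri" col && pvIn "model1" col)))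
        (pvT (b1 ++ cols.filter (fun col => pvIn "sum_int_" col && pvIn "model2" col))
             (b2 ++ cols.filter (fun col => pvIn "sum_ext_" col && pvIn "model2" col))
             (b3 ++ cols.filter (fun col => pvIn "sum_dp" col && pvIn "model2" col))
             (b4 ++ cols.filter (fun col => pvIn "_thickavg" col && pvIn "model2" col))
             (b5 ++ cols.filter (fun col => pvIn "_vol" col && pvIn "model2" col))
             (b6 ++ cols.filter (fun col => pvIn "age_mri" col && pvIn "model2" col)))
        (pvT (c1 ++ cols.filter (fun col => pvIn "sum_int_" col && pvM0 col))
             (c2 ++ cols.filter (fun col => pvIn "sum_ext_" col && pvM0 col))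
             (c3 ++ cols.filter (fun col => pvIn "sum_dp" col && pvM0 col))
             (c4 ++ cols.filter (fun col => pvIn "_thickavg" col && pvM0 col))
             (c5 ++ cols.filter (fun col => pvIn "_vol" col && pvM0 col))
             (c6 ++ cols.filter (fun col => pvIn "age_mri" col && pvM0 col))) := by
  induction cols generalizing a1 a2 a3 a4 a5 a6 b1 b2 b3 b4 b5 b6 c1 c2 c3 c4 c5 c6 with
  | nil => simp
  | cons col cols ih =>
    rw [List.foldl_cons, pv_step_eq]
    rw [ih]
    simp [pvS, pvT, List.filter_cons, List.append_assoc, pv_ite_cons]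

-- evaluating A's concrete 6-iteration loop over type_dict
lemma pv_A_eq (cols : List String) :
    generate_column_subsets_py cols
    = pvS
        (pvT (cols.filter (fun col => (pvIn "sum_int_" col || "sum_int_" == col) && pvIn "model1" col))
             (cols.filter (fun col => (pvIn "sum_ext_" col || "sum_ext_" == col) && pvIn "model1" col))
             (cols.filter (fun col => (pvIn "sum_dp" col || "sum_dp" == col) && pvIn "model1" col))
             (cols.filter (fun col => (pvIn "_thickavg" col || "_thickavg" == col) && pvIn "model1" col))
             (cols.filter (fun col => (pvIn "_vol" col || "_vol" == col) && pvIn "model1" col))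
             (cols.filter (fun col => (pvIn "age_mri" col || "age_mri" == col) && pvIn "model1" col)))
        (pvT (cols.filter (fun col => (pvIn "sum_int_" col || "sum_int_" == col) && pvIn "model2" col))
             (cols.filter (fun col => (pvIn "sum_ext_" col || "sum_ext_" == col) && pvIn "model2" col))
             (cols.filter (fun col => (pvIn "sum_dp" col || "sum_dp" == col) && pvIn "model2" col))
             (cols.filter (fun col => (pvIn "_thickavg" col || "_thickavg" == col) && pvIn "model2" col))
             (cols.filter (fun col => (pvIn "_vol" col || "_vol" == col) && pvIn "model2" col))
             (cols.filter (fun col => (pvIn "age_mri" col || "age_mri" == col) && pvIn "model2" col)))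
        (pvT (cols.filter (fun col => ((pvIn "sum_int_" col || "sum_int_" == col) && (!pvIn "model1" col && !pvIn "model2" col)) && !(col == "age_mri")))
             (cols.filter (fun col => ((pvIn "sum_ext_" col || "sum_ext_" == col) && (!pvIn "model1" col && !pvIn "model2" col)) && !(col == "age_mri")))
             (cols.filter (fun col => ((pvIn "sum_dp" col || "sum_dp" == col) && (!pvIn "model1" col && !pvIn "model2" col)) && !(col == "age_mri")))
             (cols.filter (fun col => ((pvIn "_thickavg" col || "_thickavg" == col) && (!pvIn "model1" col && !pvIn "model2" col)) && !(col == "age_mri")))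
             (cols.filter (fun col => ((pvIn "_vol" col || "_vol" == col) && (!pvIn "model1" col && !pvIn "model2" col)) && !(col == "age_mri")))
             (cols.filter (fun col => ((pvIn "age_mri" col || "age_mri" == col) && (!pvIn "model1" col && !pvIn "model2" col)) && !(col == "age_mri")))) := by
  simp [generate_column_subsets_py, pvTypeDict, pvModAt, pvS, pvT, List.foldl]

-- 'val in col or val == col' is just 'val in col' (equal strings are substrings of each other)
lemma pv_or_eq_self (v col : String) : (pvIn v col || v == col) = pvIn v col := by
  cases hEq : v == col
  · simp
  · have hv : v = col := eq_of_beq hEq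
    subst hv
    have : pvIn v v = true := (PySem.Str.isIn_iff_infix v v).mpr List.infix_rfl
    simp [this]

-- ===== VERDICT (by name: the statement is the Claim_ definition above) =====
theorem generate_column_subsets_py_spec : Claim_equal_generate_column_subsets_py := by
  intro cols _
  unfold Spec_generate_column_subsets_py
  rw [pv_A_eq]
  have hB : generate_column_subsets_py_alt cols
      = pvS
          (pvT (cols.filter (fun col => pvIn "sum_int_" col && pvIn "model1" col))
               (cols.filter (fun col => pvIn "sum_ext_" col && pvIn "model1" col))
               (cols.filter (fun col => pvIn "sum_dp" col && pvIn "model1" col))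
               (cols.filter (fun col => pvIn "_thickavg" col && pvIn "model1" col))
               (cols.filter (fun col => pvIn "_vol" col && pvIn "model1" col))
               (cols.filter (fun col => pvIn "age_mri" col && pvIn "model1" col)))
          (pvT (cols.filter (fun col => pvIn "sum_int_" col && pvIn "model2" col))
               (cols.filter (fun col => pvIn "sum_ext_" col && pvIn "model2" col))
               (cols.filter (fun col => pvIn "sum_dp" col && pvIn "model2" col))
               (cols.filter (fun col => pvIn "_thickavg" col && pvIn "model2" col))
               (cols.filter (fun col => pvIn "_vol" col && pvIn "model2" col))
               (cols.filter (fun col => pvIn "age_mri" col && pvIn "model2" col)))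
          (pvT (cols.filter (fun col => pvIn "sum_int_" col && pvM0 col))
               (cols.filter (fun col => pvIn "sum_ext_" col && pvM0 col))
               (cols.filter (fun col => pvIn "sum_dp" col && pvM0 col))
               (cols.filter (fun col => pvIn "_thickavg" col && pvM0 col))
               (cols.filter (fun col => pvIn "_vol" col && pvM0 col))
               (cols.filter (fun col => pvIn "age_mri" col && pvM0 col))) := by
    have h := pv_loop_eq cols [] [] [] [] [] [] [] [] [] [] [] [] [] [] [] [] [] []
    simpa [generate_column_subsets_py_alt, pvS, pvT, pvTypeDict] using h
  rw [hB]
  simp only [pvS, pvT, pv_or_eq_self, pvM0, Bool.and_assoc]
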